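-- pv_equiv track=rewrite | github.com/bhuvvaan/warehouse_env_gen_public | map_generation/dfs2.py | validate_blue_connectivity
-- ===== SOURCE A (Python) =====
-- x_size = 33   # Number of rows
--
-- y_size = 32  # Number of columns
--
-- def validate_blue_connectivity(grid):
--     """
--     Check that all blue tiles ('e') are connected, treating black tiles ('@') as barriers.
--     We use a DFS starting from the first blue tile found.
--     """
--     visited = [[False for _ in range(y_size)] for _ in range(x_size)]
--
--     def dfs(i, j):
--         if i < 0 or i >= x_size or j < 0 or j >= y_size:
--             return
--         if grid[i][j] == '@' or visited[i][j]:
--             return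
--         visited[i][j] = True
--         for dx, dy in [(-1, 0), (1, 0), (0, -1), (0, 1)]:
--             dfs(i + dx, j + dy)
--
--     # Find the first blue tile to start DFS.
--     start_found = False
--     for i in range(x_size):
--         for j in range(y_size):
--             if grid[i][j] == 'e':
--                 dfs(i, j)
--                 start_found = True
--                 break
--         if start_found:
--             break
--
--     # If no blue tile is found, connectivity fails.
--     if not start_found:
--         return False
--
--     # Ensure every blue tile was visited by DFS.
--     for i in range(x_size):
--         for j in range(y_size):
--             if grid[i][j] == 'e' and not visited[i][j]:
--                 return False
--     return True
-- ===== SOURCE B (Python) =====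
-- x_size = 33   # Number of rows
--
-- y_size = 32  # Number of columns
--
-- def validate_blue_connectivity(grid):
--     """
--     Check that all blue tiles ('e') are connected, treating black tiles ('@') as barriers.
--     Iterative flood fill (explicit stack) from the first blue tile found.
--     """
--     start = next(((i, j) for i in range(x_size) for j in range(y_size)
--                   if grid[i][j] == 'e'), None)
--     if start is None:
--         return False
--     visited = set()
--     stack = [start]
--     while stack:
--         i, j = stack.pop()
--         if i < 0 or i >= x_size or j < 0 or j >= y_size:
--             continue
--         if grid[i][j] == '@' or (i, j) in visited:
--             continue
--         visited.add((i, j))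
--         stack.extend([(i - 1, j), (i + 1, j), (i, j - 1), (i, j + 1)])
--     return all((i, j) in visited for i in range(x_size) for j in range(y_size)
--                if grid[i][j] == 'e')
-- ===== Notes on version B (the rewrite author's own statement) =====
-- stated objective: alternative
-- what changed: Replaces the recursive DFS with an iterative explicit-stack flood fill over the same 33x32 window (also avoiding deep recursion); the start-cell search and the final check become generator/next and all(...) one-liners.
import Mathlib
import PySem

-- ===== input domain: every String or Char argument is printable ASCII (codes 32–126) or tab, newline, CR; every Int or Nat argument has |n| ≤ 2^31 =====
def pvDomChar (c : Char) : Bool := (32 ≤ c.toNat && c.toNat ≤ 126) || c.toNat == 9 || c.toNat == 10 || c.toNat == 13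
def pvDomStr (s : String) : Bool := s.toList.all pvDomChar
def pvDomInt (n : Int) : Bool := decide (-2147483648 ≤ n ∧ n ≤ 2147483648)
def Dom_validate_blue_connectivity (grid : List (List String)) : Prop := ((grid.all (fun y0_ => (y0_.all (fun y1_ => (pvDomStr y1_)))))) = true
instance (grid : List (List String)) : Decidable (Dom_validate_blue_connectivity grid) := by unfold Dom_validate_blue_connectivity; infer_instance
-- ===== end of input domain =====

-- B replaces A's recursive DFS by an iterative explicit-stack flood fill (same window, same visited set);
-- equivalence of the returned Bool is proved on Pre_ below.

-- grid[i][j] (both ports only evaluate it where Pre_ guarantees it exists; "" is an arbitrary default)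
def pvGetCell (grid : List (List String)) (i j : Int) : String :=
  (PySem.List.pyGet? ((PySem.List.pyGet? grid i).getD []) j).getD ""

-- ===== PORT A =====
-- the recursive dfs; fuel 1057 = 33*32+1 bounds the recursion depth, which Python bounds by the
-- distinct cells marked along the call chain (≤ 1056), so the fuel is never exhausted
def pvDfsA (grid : List (List String)) : Nat → List (Int × Int) → Int → Int → List (Int × Int)
  | 0, v, _, _ => v
  | fuel + 1, v, i, j =>
    if i < 0 || 33 ≤ i || j < 0 || 32 ≤ j then v
    else if pvGetCell grid i j == "@" || decide ((i, j) ∈ v) then v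
    else
      let v1 := (i, j) :: v
      let v2 := pvDfsA grid fuel v1 (i - 1) j
      let v3 := pvDfsA grid fuel v2 (i + 1) j
      let v4 := pvDfsA grid fuel v3 i (j - 1)
      pvDfsA grid fuel v4 i (j + 1)

-- the double loop with the start_found flag / break: first (i, j) in row-major order with grid[i][j] == 'e'
def pvFindStartA (grid : List (List String)) : Option (Int × Int) :=
  (PySem.List.pyRange 0 33 1).findSome? (fun i =>
    ((PySem.List.pyRange 0 32 1).find? (fun j => pvGetCell grid i j == "e")).map (fun j => (i, j)))

def validate_blue_connectivity (grid : List (List String)) : Bool :=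
  match pvFindStartA grid with
  | none => false
  | some (si, sj) =>
    let visited := pvDfsA grid 1057 [] si sj
    (PySem.List.pyRange 0 33 1).all (fun i =>
      (PySem.List.pyRange 0 32 1).all (fun j =>
        !(pvGetCell grid i j == "e") || decide ((i, j) ∈ visited)))

-- ===== PORT B =====
-- the 33*32 window cells in row-major order (B's generator 'for i in range(33) for j in range(32)')
def pvCells : List (Int × Int) :=
  (PySem.List.pyRange 0 33 1).flatMap (fun i => (PySem.List.pyRange 0 32 1).map (fun j => (i, j)))

-- iterative flood fill; list head = Python stack top (stack.pop() takes the last pushed cell,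
-- so the four neighbours are consed in reverse push order); fuel 5282 > 1 + 4*1056 ≥ total pushes
def pvFloodB (grid : List (List String)) : Nat → List (Int × Int) → List (Int × Int) → List (Int × Int)
  | 0, v, _ => v
  | _ + 1, v, [] => v
  | fuel + 1, v, (i, j) :: st =>
    if i < 0 || 33 ≤ i || j < 0 || 32 ≤ j then pvFloodB grid fuel v st
    else if pvGetCell grid i j == "@" || decide ((i, j) ∈ v) then pvFloodB grid fuel v st
    else pvFloodB grid fuel ((i, j) :: v)
      ((i, j + 1) :: (i, j - 1) :: (i + 1, j) :: (i - 1, j) :: st)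

def validate_blue_connectivity_alt (grid : List (List String)) : Bool :=
  match pvCells.find? (fun c => pvGetCell grid c.1 c.2 == "e") with
  | none => false
  | some s =>
    let visited := pvFloodB grid 5282 [] [s]
    pvCells.all (fun c => !(pvGetCell grid c.1 c.2 == "e") || decide (c ∈ visited))

-- ===== PRECONDITION & SPEC =====
def pvNbrs (c : Int × Int) : List (Int × Int) :=
  [(c.1 - 1, c.2), (c.1 + 1, c.2), (c.1, c.2 - 1), (c.1, c.2 + 1)]

-- a window cell that actually exists in the (possibly smaller) grid
def pvPresent (grid : List (List String)) (c : Int × Int) : Bool :=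
  decide (0 ≤ c.1 ∧ c.1 < 33 ∧ 0 ≤ c.2 ∧ c.2 < 32 ∧ c.1 < (grid.length : Int) ∧
    c.2 < ((((PySem.List.pyGet? grid c.1).getD []).length : Int)))

def pvIdx (c : Int × Int) : Int := c.1 * 32 + c.2  -- row-major scan position

-- the cells A's dfs would mark on the partial grid (present, non-'@'); used ONLY to describe
-- where A crashes, never to produce the answer
def pvFloodP (grid : List (List String)) : Nat → List (Int × Int) → List (Int × Int) → List (Int × Int)
  | 0, v, _ => v
  | _ + 1, v, [] => v
  | fuel + 1, v, c :: st =>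
    if pvPresent grid c && !(pvGetCell grid c.1 c.2 == "@") && !(decide (c ∈ v)) then
      pvFloodP grid fuel (c :: v) (pvNbrs c ++ st)
    else pvFloodP grid fuel v st

-- Pre_ is exactly the set of grids on which the Python A returns (it raises IndexError elsewhere).
-- A's crash set is itself flood-shaped — A reads the full 33x32 window unless an unvisited 'e' stops
-- the final scan first, and its dfs reads every window neighbour of every cell it marks — so the
-- exact domain description must trace the same flood over the partial grid: either the whole window
-- is indexable, or (scanning row-major) the first 'e' comes before the first missing cell, the flood
-- from it touches only present cells, and some 'e' outside the flood also precedes the first missing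
-- cell (A then returns False there). Nothing here computes A's answer on admitted inputs.
def Pre_validate_blue_connectivity (grid : List (List String)) : Prop :=
  (let fa := ((pvCells.find? (fun c => !(pvPresent grid c))).map pvIdx).getD 1056
   match pvCells.find? (fun c => pvGetCell grid c.1 c.2 == "e") with
   | none => fa == 1056
   | some p =>
     if fa == 1056 then true
     else
       decide (pvIdx p < fa) &&
       (let F := pvFloodP grid 1057 [] [p]
        F.all (fun c => (pvNbrs c).all (fun n =>
          !(decide (0 ≤ n.1 ∧ n.1 < 33 ∧ 0 ≤ n.2 ∧ n.2 < 32)) || pvPresent grid n)) &&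
        pvCells.any (fun q =>
          pvGetCell grid q.1 q.2 == "e" && !(decide (q ∈ F)) && decide (pvIdx q < fa)))) = true
instance (grid : List (List String)) : Decidable (Pre_validate_blue_connectivity grid) := by
  unfold Pre_validate_blue_connectivity; infer_instance

def pvWitness_validate_blue_connectivity : List (List String) :=
  [["e", "@", "e"], ["@", "@", "@"]]

def Spec_validate_blue_connectivity (grid : List (List String)) (out : Bool) : Prop := out = validate_blue_connectivity_alt grid
instance (grid : List (List String)) (out : Bool) : Decidable (Spec_validate_blue_connectivity grid out) := by unfold Spec_validate_blue_connectivity; infer_instance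

-- ===== CLAIM (what is proved, stated in full; the proofs are below) =====
def Claim_equal_validate_blue_connectivity : Prop := ∀ (grid : List (List String)), Dom_validate_blue_connectivity grid → Pre_validate_blue_connectivity grid → Spec_validate_blue_connectivity grid (validate_blue_connectivity grid)

-- ===== LEMMAS AND PROOFS =====

-- a cell is "ok" when it is inside the 33×32 window and not a barrier
def pvOk (grid : List (List String)) (c : Int × Int) : Bool :=
  !(c.1 < 0 || 33 ≤ c.1 || c.2 < 0 || 32 ≤ c.2) && !(pvGetCell grid c.1 c.2 == "@")

-- reachability through ok cells (both endpoints ok)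
inductive pvReach (grid : List (List String)) (a : Int × Int) : (Int × Int) → Prop
  | refl : pvOk grid a = true → pvReach grid a a
  | step (b c : Int × Int) : pvReach grid a b → c ∈ pvNbrs b → pvOk grid c = true →
      pvReach grid a c

-- number of window cells not yet visited (the termination measure of both loops)
def pvCu (v : List (Int × Int)) : Nat :=
  pvCells.countP (fun c => decide (c ∉ v))

theorem pvReach_ok_left {g : List (List String)} {a c : Int × Int}
    (h : pvReach g a c) : pvOk g a = true := by
  induction h with
  | refl hc => exact hc
  | step b c _ _ _ ih => exact ih

theorem pvReach_trans {g : List (List String)} {a b c : Int × Int}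
    (h1 : pvReach g a b) (h2 : pvReach g b c) : pvReach g a c := by
  induction h2 with
  | refl _ => exact h1
  | step y z _ hn ho ih => exact pvReach.step y z ih hn ho

theorem pvReach_single {g : List (List String)} {a c : Int × Int}
    (ha : pvOk g a = true) (hc : pvOk g c = true) (hn : c ∈ pvNbrs a) : pvReach g a c :=
  pvReach.step a c (pvReach.refl ha) hn hc

theorem pvMem_cells {c : Int × Int} :
    c ∈ pvCells ↔ 0 ≤ c.1 ∧ c.1 < 33 ∧ 0 ≤ c.2 ∧ c.2 < 32 := by
  constructor
  · intro h
    simp only [pvCells, List.mem_flatMap, List.mem_map, PySem.List.mem_pyRange_one] at h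
    obtain ⟨i, hi, j, hj, rfl⟩ := h
    exact ⟨hi.1, hi.2, hj.1, hj.2⟩
  · rintro ⟨h1, h2, h3, h4⟩
    simp only [pvCells, List.mem_flatMap, List.mem_map, PySem.List.mem_pyRange_one]
    exact ⟨c.1, ⟨h1, h2⟩, c.2, ⟨h3, h4⟩, rfl⟩

theorem pvOk_mem_cells {g : List (List String)} {c : Int × Int}
    (h : pvOk g c = true) : c ∈ pvCells := by
  simp only [pvOk, Bool.and_eq_true, Bool.not_eq_true', Bool.or_eq_false_iff,
    decide_eq_false_iff_not, not_lt, not_le] at h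
  exact pvMem_cells.mpr ⟨h.1.1.1.1, by omega, h.1.1.2, by omega⟩

theorem pvCountP_lt {α : Type} (l : List α) (p q : α → Bool)
    (h : ∀ a ∈ l, p a = true → q a = true) (a : α) (ha : a ∈ l) (hq : q a = true)
    (hp : ¬ p a = true) : l.countP p < l.countP q := by
  induction l with
  | nil => cases ha
  | cons b t ih =>
    rcases List.mem_cons.mp ha with rfl | hat
    · have hle : t.countP p ≤ t.countP q :=
        List.countP_mono_left (fun x hx => h x (List.mem_cons_of_mem _ hx))
      simp only [List.countP_cons, hq]
      simp only [Bool.not_eq_true] at hp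
      simp [hp]; omega
    · have hlt : t.countP p < t.countP q :=
        ih (fun x hx => h x (List.mem_cons_of_mem _ hx)) hat
      have hbq : p b = true → q b = true := h b List.mem_cons_self
      simp only [List.countP_cons]
      by_cases hb : p b = true
      · simp [hb, hbq hb]; omega
      · simp only [Bool.not_eq_true] at hb
        simp [hb]
        by_cases hqb : q b = true <;> simp [hqb] <;> omega

theorem pvCu_cons_lt {v : List (Int × Int)} {c : Int × Int}
    (hc : c ∈ pvCells) (hv : c ∉ v) : pvCu (c :: v) < pvCu v := by
  refine pvCountP_lt pvCells _ _ ?_ c hc (by simpa using hv) (by simp)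
  intro a _ ha
  simp only [decide_eq_true_eq, List.mem_cons, not_or] at ha ⊢
  exact ha.2

theorem pvCu_anti {v w : List (Int × Int)}
    (h : v ⊆ w) : pvCu w ≤ pvCu v := by
  refine List.countP_mono_left (fun a _ ha => ?_)
  simp only [decide_eq_true_eq] at ha ⊢
  exact fun hav => ha (h hav)

theorem pvDfsA_succ (g : List (List String)) (f : Nat) (v : List (Int × Int)) (i j : Int) :
    pvDfsA g (f + 1) v i j =
      if i < 0 || 33 ≤ i || j < 0 || 32 ≤ j then v
      else if pvGetCell g i j == "@" || decide ((i, j) ∈ v) then v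
      else pvDfsA g f (pvDfsA g f (pvDfsA g f (pvDfsA g f ((i, j) :: v) (i - 1) j)
        (i + 1) j) i (j - 1)) i (j + 1) := rfl

theorem pvFloodB_cons (g : List (List String)) (f : Nat) (v st : List (Int × Int)) (i j : Int) :
    pvFloodB g (f + 1) v ((i, j) :: st) =
      if i < 0 || 33 ≤ i || j < 0 || 32 ≤ j then pvFloodB g f v st
      else if pvGetCell g i j == "@" || decide ((i, j) ∈ v) then pvFloodB g f v st
      else pvFloodB g f ((i, j) :: v)
        ((i, j + 1) :: (i, j - 1) :: (i + 1, j) :: (i - 1, j) :: st) := rfl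

-- the negated guards of the loop bodies say exactly "the cell is ok and not yet visited"
theorem pvGuard_ok {g : List (List String)} {v : List (Int × Int)} {i j : Int}
    (h1 : ¬ (i < 0 || 33 ≤ i || j < 0 || 32 ≤ j) = true)
    (h2 : ¬ (pvGetCell g i j == "@" || decide ((i, j) ∈ v)) = true) :
    pvOk g (i, j) = true ∧ (i, j) ∉ v := by
  simp only [Bool.or_eq_true, not_or, decide_eq_true_eq] at h1 h2
  refine ⟨?_, h2.2⟩
  simp only [pvOk, Bool.and_eq_true, Bool.not_eq_true', Bool.or_eq_false_iff]
  refine ⟨⟨⟨⟨?_, ?_⟩, ?_⟩, ?_⟩, ?_⟩ <;> simp_all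

theorem pvDfs_sound (g : List (List String)) :
    ∀ (fuel : Nat) (v : List (Int × Int)) (i j : Int) (c : Int × Int),
      c ∈ pvDfsA g fuel v i j → c ∈ v ∨ pvReach g (i, j) c := by
  intro fuel
  induction fuel with
  | zero => intro v i j c hc; exact Or.inl hc
  | succ f ih =>
    intro v i j c hc
    rw [pvDfsA_succ] at hc
    split at hc
    · exact Or.inl hc
    split at hc
    · exact Or.inl hc
    rename_i hg1 hg2
    obtain ⟨hok, _⟩ := pvGuard_ok hg1 hg2
    -- peel the four recursive calls, turning reachability from a neighbour into
    -- reachability from (i, j) via pvReach_single and pvReach_trans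
    have step : ∀ (w : List (Int × Int)) (a : Int × Int), a ∈ pvNbrs (i, j) →
        c ∈ pvDfsA g f w a.1 a.2 → c ∈ w ∨ pvReach g (i, j) c := by
      intro w a hn hcw
      rcases ih w a.1 a.2 c hcw with h | h
      · exact Or.inl h
      · exact Or.inr (pvReach_trans (pvReach_single hok (pvReach_ok_left h) hn) h)
    rcases step _ (i, j + 1) (by simp [pvNbrs]) hc with h | h
    · rcases step _ (i, j - 1) (by simp [pvNbrs]) h with h | h
      · rcases step _ (i + 1, j) (by simp [pvNbrs]) h with h | h
        · rcases step _ (i - 1, j) (by simp [pvNbrs]) h with h | h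
          · rcases List.mem_cons.mp h with rfl | h
            · exact Or.inr (pvReach.refl hok)
            · exact Or.inl h
          · exact Or.inr h
        · exact Or.inr h
      · exact Or.inr h
    · exact Or.inr h

theorem pvDfs_closed (g : List (List String)) :
    ∀ (fuel : Nat) (v : List (Int × Int)) (i j : Int), pvCu v < fuel →
      v ⊆ pvDfsA g fuel v i j ∧
      (pvOk g (i, j) = true → (i, j) ∈ pvDfsA g fuel v i j) ∧
      (∀ c ∈ pvDfsA g fuel v i j, c ∉ v →
        ∀ n ∈ pvNbrs c, pvOk g n = true → n ∈ pvDfsA g fuel v i j) := by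
  intro fuel
  induction fuel with
  | zero => intro v i j hfuel; omega
  | succ f ih =>
    intro v i j hfuel
    rw [pvDfsA_succ]
    split
    · rename_i hg1
      refine ⟨List.Subset.refl v, ?_, fun c hc hcv => absurd hc hcv⟩
      intro hok
      exfalso
      simp only [pvOk, Bool.and_eq_true, Bool.not_eq_true', Bool.or_eq_false_iff,
        decide_eq_false_iff_not, not_lt, not_le] at hok
      simp only [Bool.or_eq_true, decide_eq_true_eq] at hg1
      rcases hok with ⟨⟨⟨⟨a1, a2⟩, a3⟩, a4⟩, _⟩
      rcases hg1 with (((h | h) | h) | h) <;> omega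
    rename_i hg1
    split
    · rename_i hg2
      refine ⟨List.Subset.refl v, ?_, fun c hc hcv => absurd hc hcv⟩
      intro hok
      simp only [Bool.or_eq_true, decide_eq_true_eq] at hg2
      rcases hg2 with h | h
      · exfalso
        simp only [pvOk, Bool.and_eq_true, Bool.not_eq_true'] at hok
        exact absurd h (by simp [hok.2])
      · exact h
    · rename_i hg2
      obtain ⟨hok, hnv⟩ := pvGuard_ok hg1 hg2
      have h1 : pvCu ((i, j) :: v) < pvCu v := pvCu_cons_lt (pvOk_mem_cells hok) hnv
      have hf1 : pvCu ((i, j) :: v) < f := by omega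
      obtain ⟨m2, s2, c2⟩ := ih ((i, j) :: v) (i - 1) j hf1
      have hf2 : pvCu (pvDfsA g f ((i, j) :: v) (i - 1) j) < f :=
        lt_of_le_of_lt (pvCu_anti m2) hf1
      obtain ⟨m3, s3, c3⟩ := ih (pvDfsA g f ((i, j) :: v) (i - 1) j) (i + 1) j hf2
      have hf3 : pvCu (pvDfsA g f (pvDfsA g f ((i, j) :: v) (i - 1) j) (i + 1) j) < f :=
        lt_of_le_of_lt (pvCu_anti m3) hf2
      obtain ⟨m4, s4, c4⟩ := ih (pvDfsA g f (pvDfsA g f ((i, j) :: v) (i - 1) j) (i + 1) j)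
        i (j - 1) hf3
      have hf4 : pvCu (pvDfsA g f (pvDfsA g f (pvDfsA g f ((i, j) :: v) (i - 1) j) (i + 1) j)
          i (j - 1)) < f := lt_of_le_of_lt (pvCu_anti m4) hf3
      obtain ⟨m5, s5, c5⟩ := ih (pvDfsA g f (pvDfsA g f (pvDfsA g f ((i, j) :: v) (i - 1) j)
        (i + 1) j) i (j - 1)) i (j + 1) hf4
      have hv4R := m5
      have hv3R := m4.trans hv4R
      have hv2R := m3.trans hv3R
      have hv1R := m2.trans hv2R
      refine ⟨(List.subset_cons_self _ _).trans hv1R, ?_, ?_⟩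
      · intro _; exact hv1R List.mem_cons_self
      · intro c hc hcv n hn hokn
        by_cases h4 : c ∈ pvDfsA g f (pvDfsA g f (pvDfsA g f ((i, j) :: v) (i - 1) j)
            (i + 1) j) i (j - 1)
        · by_cases h3 : c ∈ pvDfsA g f (pvDfsA g f ((i, j) :: v) (i - 1) j) (i + 1) j
          · by_cases h2c : c ∈ pvDfsA g f ((i, j) :: v) (i - 1) j
            · by_cases h1c : c ∈ (i, j) :: v
              · have hcij : c = (i, j) := by
                  rcases List.mem_cons.mp h1c with h | h
                  · exact h
                  · exact absurd h hcv
                subst hcij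
                simp only [pvNbrs, List.mem_cons, List.not_mem_nil, or_false] at hn
                rcases hn with rfl | rfl | rfl | rfl
                · exact hv2R (s2 hokn)
                · exact hv3R (s3 hokn)
                · exact hv4R (s4 hokn)
                · exact s5 hokn
              · exact hv2R (c2 c h2c h1c n hn hokn)
            · exact hv3R (c3 c h3 h2c n hn hokn)
          · exact hv4R (c4 c h4 h3 n hn hokn)
        · exact c5 c hc h4 n hn hokn

theorem pvOk_elim {g : List (List String)} {i j : Int} (h : pvOk g (i, j) = true) :
    (i < 0 || 33 ≤ i || j < 0 || 32 ≤ j) = false ∧ (pvGetCell g i j == "@") = false := by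
  simpa [pvOk] using h

theorem pvFlood_sound (g : List (List String)) :
    ∀ (fuel : Nat) (v st : List (Int × Int)) (c : Int × Int),
      c ∈ pvFloodB g fuel v st → c ∈ v ∨ ∃ a ∈ st, pvReach g a c := by
  intro fuel
  induction fuel with
  | zero => intro v st c hc; exact Or.inl hc
  | succ f ih =>
    intro v st c hc
    rcases st with _ | ⟨⟨i, j⟩, st⟩
    · exact Or.inl hc
    rw [pvFloodB_cons] at hc
    have tail : c ∈ pvFloodB g f v st → c ∈ v ∨ ∃ a ∈ (i, j) :: st, pvReach g a c := by
      intro h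
      rcases ih v st c h with h | ⟨a, ha, hr⟩
      · exact Or.inl h
      · exact Or.inr ⟨a, List.mem_cons_of_mem _ ha, hr⟩
    split at hc
    · exact tail hc
    split at hc
    · exact tail hc
    rename_i hg1 hg2
    obtain ⟨hok, hnv⟩ := pvGuard_ok hg1 hg2
    rcases ih _ _ c hc with h | ⟨a, ha, hr⟩
    · rcases List.mem_cons.mp h with rfl | h
      · exact Or.inr ⟨(i, j), List.mem_cons_self, pvReach.refl hok⟩
      · exact Or.inl h
    · have viaN : a ∈ pvNbrs (i, j) → c ∈ v ∨ ∃ a ∈ (i, j) :: st, pvReach g a c := by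
        intro hn
        exact Or.inr ⟨(i, j), List.mem_cons_self,
          pvReach_trans (pvReach_single hok (pvReach_ok_left hr) hn) hr⟩
      simp only [List.mem_cons] at ha
      rcases ha with rfl | rfl | rfl | rfl | ha
      · exact viaN (by simp [pvNbrs])
      · exact viaN (by simp [pvNbrs])
      · exact viaN (by simp [pvNbrs])
      · exact viaN (by simp [pvNbrs])
      · exact Or.inr ⟨a, List.mem_cons_of_mem _ ha, hr⟩

theorem pvFlood_closed (g : List (List String)) :
    ∀ (fuel : Nat) (v st : List (Int × Int)), st.length + 5 * pvCu v < fuel →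
      v ⊆ pvFloodB g fuel v st ∧
      (∀ a ∈ st, pvOk g a = true → a ∈ pvFloodB g fuel v st) ∧
      (∀ c ∈ pvFloodB g fuel v st, c ∉ v →
        ∀ n ∈ pvNbrs c, pvOk g n = true → n ∈ pvFloodB g fuel v st) := by
  intro fuel
  induction fuel with
  | zero => intro v st h; omega
  | succ f ih =>
    intro v st hfuel
    rcases st with _ | ⟨⟨i, j⟩, st⟩
    · exact ⟨List.Subset.refl v, by simp, fun c hc hcv => absurd hc hcv⟩
    rw [pvFloodB_cons]
    simp only [List.length_cons] at hfuel
    split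
    · rename_i hg1
      obtain ⟨m, sst, cl⟩ := ih v st (by omega)
      refine ⟨m, ?_, cl⟩
      intro a ha hoka
      rcases List.mem_cons.mp ha with rfl | ha
      · exfalso
        have hb := (pvOk_elim hoka).1
        simp only [Bool.or_eq_true, Bool.or_eq_false_iff, decide_eq_true_eq,
          decide_eq_false_iff_not, not_lt, not_le] at hb hg1
        omega
      · exact sst a ha hoka
    split
    · rename_i hg2
      obtain ⟨m, sst, cl⟩ := ih v st (by omega)
      refine ⟨m, ?_, cl⟩
      intro a ha hoka
      rcases List.mem_cons.mp ha with rfl | ha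
      · simp only [Bool.or_eq_true, decide_eq_true_eq] at hg2
        rcases hg2 with h | h
        · exact absurd (pvOk_elim hoka).2 (by simp_all)
        · exact m h
      · exact sst a ha hoka
    rename_i hg1 hg2
    obtain ⟨hok, hnv⟩ := pvGuard_ok hg1 hg2
    have h1 : pvCu ((i, j) :: v) < pvCu v := pvCu_cons_lt (pvOk_mem_cells hok) hnv
    obtain ⟨m, sst, cl⟩ := ih ((i, j) :: v)
      ((i, j + 1) :: (i, j - 1) :: (i + 1, j) :: (i - 1, j) :: st) (by simp; omega)
    refine ⟨(List.subset_cons_self _ _).trans m, ?_, ?_⟩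
    · intro a ha hoka
      rcases List.mem_cons.mp ha with rfl | ha
      · exact m List.mem_cons_self
      · exact sst a (by simp [ha]) hoka
    · intro c hc hcv n hn hokn
      by_cases hcv1 : c ∈ (i, j) :: v
      · have hcij : c = (i, j) := by
          rcases List.mem_cons.mp hcv1 with h | h
          · exact h
          · exact absurd h hcv
        subst hcij
        refine sst n ?_ hokn
        simp only [pvNbrs, List.mem_cons, List.not_mem_nil, or_false] at hn
        rcases hn with rfl | rfl | rfl | rfl <;> simp
      · exact cl c hc hcv1 n hn hokn

theorem pvReach_in_closed {g : List (List String)} {R : List (Int × Int)} {s c : Int × Int}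
    (hs : s ∈ R) (hcl : ∀ c ∈ R, ∀ n ∈ pvNbrs c, pvOk g n = true → n ∈ R)
    (h : pvReach g s c) : c ∈ R := by
  induction h with
  | refl _ => exact hs
  | step b c _ hn ho ih => exact hcl b ih c hn ho

set_option maxRecDepth 8192 in
theorem pvCu_nil : pvCu [] = 1056 := by decide

-- both visited sets = the set of cells reachable from the start
theorem pvVisited_iff (g : List (List String)) (s : Int × Int) (hs : pvOk g s = true)
    (c : Int × Int) :
    (c ∈ pvDfsA g 1057 [] s.1 s.2 ↔ pvReach g s c) ∧
    (c ∈ pvFloodB g 5282 [] [s] ↔ pvReach g s c) := by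
  constructor
  · constructor
    · intro h
      rcases pvDfs_sound g 1057 [] s.1 s.2 c h with h | h
      · cases h
      · exact h
    · intro h
      obtain ⟨mA, sA, cA⟩ := pvDfs_closed g 1057 [] s.1 s.2 (by rw [pvCu_nil]; omega)
      exact pvReach_in_closed (sA hs) (fun c hc n hn hokn => cA c hc (by simp) n hn hokn) h
  · constructor
    · intro h
      rcases pvFlood_sound g 5282 [] [s] c h with h | ⟨a, ha, hr⟩
      · cases h
      · rcases List.mem_cons.mp ha with rfl | h
        · exact hr
        · cases h
    · intro h
      obtain ⟨mB, sB, cB⟩ := pvFlood_closed g 5282 [] [s] (by simp [pvCu_nil])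
      exact pvReach_in_closed (sB s List.mem_cons_self hs)
        (fun c hc n hn hokn => cB c hc (by simp) n hn hokn) h

theorem pvFindSome_eq (l1 l2 : List Int) (p : Int × Int → Bool) :
    (l1.findSome? fun i => ((l2.find? fun j => p (i, j)).map fun j => (i, j)))
      = ((l1.flatMap fun i => l2.map fun j => (i, j)).find? p) := by
  induction l1 with
  | nil => rfl
  | cons a t ih =>
    simp only [List.findSome?_cons, List.flatMap_cons, List.find?_append, ← ih,
      List.find?_map, Function.comp_def]
    cases l2.find? fun j => p (a, j) <;> simp

theorem pvFindStart_eq (g : List (List String)) :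
    pvFindStartA g = pvCells.find? (fun c => pvGetCell g c.1 c.2 == "e") := by
  unfold pvFindStartA pvCells
  exact pvFindSome_eq _ _ (fun c => pvGetCell g c.1 c.2 == "e")

theorem pvAll_eq (g : List (List String)) (A : List (Int × Int)) :
    ((PySem.List.pyRange 0 33 1).all (fun i => (PySem.List.pyRange 0 32 1).all (fun j =>
        !(pvGetCell g i j == "e") || decide ((i, j) ∈ A))))
      = pvCells.all (fun c => !(pvGetCell g c.1 c.2 == "e") || decide (c ∈ A)) := by
  simp [pvCells, List.all_flatMap, Function.comp_def]

-- ===== VERDICT (by name: the statement is the Claim_ definition above) =====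
set_option maxRecDepth 16384 in
theorem validate_blue_connectivity_spec : Claim_equal_validate_blue_connectivity := by
  unfold Claim_equal_validate_blue_connectivity
  intro grid _ _
  unfold Spec_validate_blue_connectivity validate_blue_connectivity validate_blue_connectivity_alt
  rw [pvFindStart_eq]
  cases h : pvCells.find? (fun c => pvGetCell grid c.1 c.2 == "e") with
  | none => rfl
  | some s =>
    obtain ⟨si, sj⟩ := s
    have hp := List.find?_some h
    have hb := pvMem_cells.mp (List.mem_of_find?_eq_some h)
    have hok : pvOk grid (si, sj) = true := by
      simp only [beq_iff_eq] at hp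
      simp only [pvOk, Bool.and_eq_true, Bool.not_eq_true', Bool.or_eq_false_iff,
        decide_eq_false_iff_not, not_lt, not_le, beq_eq_false_iff_ne]
      refine ⟨⟨⟨⟨?_, ?_⟩, ?_⟩, ?_⟩, ?_⟩
      · exact hb.1
      · exact hb.2.1
      · exact hb.2.2.1
      · exact hb.2.2.2
      · rw [hp]; decide
    have hAB : ∀ c : Int × Int,
        (c ∈ pvDfsA grid 1057 [] si sj) ↔ c ∈ pvFloodB grid 5282 [] [(si, sj)] := by
      intro c
      exact ((pvVisited_iff grid (si, sj) hok c).1).trans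
        ((pvVisited_iff grid (si, sj) hok c).2).symm
    dsimp only
    rw [pvAll_eq grid (pvDfsA grid 1057 [] si sj)]
    have hfe : (fun c : Int × Int =>
        !(pvGetCell grid c.1 c.2 == "e") || decide (c ∈ pvDfsA grid 1057 [] si sj))
      = (fun c : Int × Int =>
        !(pvGetCell grid c.1 c.2 == "e") || decide (c ∈ pvFloodB grid 5282 [] [(si, sj)])) := by
      funext c
      rw [decide_eq_decide.mpr (hAB c)]
    rw [hfe]
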